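-- pv_equiv track=rewrite | github.com/WeiDnite1222/Kitee | kitee_launcher/managers/launch_manager.py | filter_embedded_launch_args
-- ===== SOURCE A (Python) =====
-- def filter_embedded_launch_args(args):
--     filtered = []
--     skip_next = False
--     for index, arg in enumerate(args):
--         if skip_next:
--             skip_next = False
--             continue
--
--         if arg == "-cp" or arg == "-classpath":
--             skip_next = True
--             continue
--         if arg.startswith("-Djava.library.path="):
--             continue
--         if arg.startswith("-XX:HeapDumpPath="):
--             continue
--         if arg == "${classpath}" and index > 0 and args[index - 1] in ("-cp", "-classpath"):
--             continue
--
--         filtered.append(arg)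
--
--     return filtered
-- ===== SOURCE B (Python) =====
-- def filter_embedded_launch_args(args):
--     # Declarative reformulation: an argument at index i is the consumed value of a
--     # -cp/-classpath flag exactly when the run of consecutive flags ending just
--     # before i has odd length.  So first compute, for every position, the length
--     # of that flag run (a prefix scan), then keep the survivors in one
--     # comprehension driven only by the run length.
--     flags = ("-cp", "-classpath")
--     runs = []
--     r = 0
--     for a in args:
--         runs.append(r)
--         r = r + 1 if a in flags else 0
--     return [a for a, r in zip(args, runs)
--             if r % 2 == 0
--             and a not in flags
--             and not a.startswith("-Djava.library.path=")
--             and not a.startswith("-XX:HeapDumpPath=")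
--             and not (a == "${classpath}" and r > 0)]
-- ===== Notes on version B (the rewrite author's own statement) =====
-- stated objective: alternative
-- what changed: Replaced A's stateful single pass with a skip_next boolean by a declarative two-stage formulation: first a prefix scan computing, for every position, the length of the run of consecutive -cp/-classpath flags ending just before it, then a stateless comprehension that keeps an argument iff its run length is even (odd means it is a flag's consumed value), it is not a flag, not a -Djava.library.path=/-XX:HeapDumpPath= prefix, and not ${classpath} directly after a flag run.
import Mathlib
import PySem

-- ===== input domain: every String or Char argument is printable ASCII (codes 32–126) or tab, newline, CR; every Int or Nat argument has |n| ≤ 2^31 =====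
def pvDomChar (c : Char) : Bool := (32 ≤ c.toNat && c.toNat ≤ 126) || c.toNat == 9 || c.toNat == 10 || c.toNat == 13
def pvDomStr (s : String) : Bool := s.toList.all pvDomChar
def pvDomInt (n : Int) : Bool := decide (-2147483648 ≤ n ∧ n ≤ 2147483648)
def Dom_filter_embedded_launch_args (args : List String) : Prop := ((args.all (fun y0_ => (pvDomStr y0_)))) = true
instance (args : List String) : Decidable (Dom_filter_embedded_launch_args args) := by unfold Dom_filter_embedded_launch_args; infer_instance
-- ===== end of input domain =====

-- B replaces A's stateful skip_next loop by a two-stage formulation: a prefix scan of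
-- flag-run lengths followed by a stateless comprehension keyed on run-length parity
-- (objective: alternative).


-- ===== PORT A =====
-- A's for-loop over enumerate(args) with state (filtered, skip_next), branch order preserved.
def pvALoop (args : List String) : List (Int × String) → List String → Bool → List String
  | [], filtered, _ => filtered
  | (index, arg) :: rest, filtered, skip =>
    if skip then pvALoop args rest filtered false
    else if arg = "-cp" ∨ arg = "-classpath" then pvALoop args rest filtered true
    else if PySem.Str.startswith arg "-Djava.library.path=" then pvALoop args rest filtered false
    else if PySem.Str.startswith arg "-XX:HeapDumpPath=" then pvALoop args rest filtered false
    -- args[index - 1] is in range here (the guard gives index > 0), so pyGetD is exact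
    else if arg = "${classpath}" ∧ index > 0 ∧
        (PySem.List.pyGetD args (index - 1) "" = "-cp" ∨ PySem.List.pyGetD args (index - 1) "" = "-classpath") then
      pvALoop args rest filtered false
    else pvALoop args rest (filtered ++ [arg]) false

def filter_embedded_launch_args (args : List String) : List String :=
  pvALoop args (PySem.List.enumerate args) [] false

-- ===== PORT B =====
-- B stage 1: `a in flags`
def pvIsFlag (a : String) : Bool := a == "-cp" || a == "-classpath"

-- B stage 2: the prefix scan building, for each position, the length of the run of
-- consecutive flags ending just before it (the Python loop filling `runs`).
def pvRuns : List String → Nat → List Nat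
  | [], _ => []
  | a :: rest, r => r :: pvRuns rest (if pvIsFlag a then r + 1 else 0)

-- B stage 3: the comprehension's keep-condition on one (arg, run) pair.
def pvKeep : String × Nat → Option String
  | (a, r) =>
    if r % 2 == 0 && !pvIsFlag a
        && !(PySem.Str.startswith a "-Djava.library.path=")
        && !(PySem.Str.startswith a "-XX:HeapDumpPath=")
        && !(a == "${classpath}" && decide (0 < r)) then some a else none

def filter_embedded_launch_args_alt (args : List String) : List String :=
  (args.zip (pvRuns args 0)).filterMap pvKeep

-- ===== PRECONDITION & SPEC =====
def Spec_filter_embedded_launch_args (args : List String) (out : List String) : Prop := out = filter_embedded_launch_args_alt args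
instance (args : List String) (out : List String) : Decidable (Spec_filter_embedded_launch_args args out) := by unfold Spec_filter_embedded_launch_args; infer_instance

-- ===== CLAIM (what is proved, stated in full; the proofs are below) =====
def Claim_equal_filter_embedded_launch_args : Prop := ∀ (args : List String), Dom_filter_embedded_launch_args args → Spec_filter_embedded_launch_args args (filter_embedded_launch_args args)

-- ===== LEMMAS AND PROOFS =====

-- Loop correspondence: A's loop on the enumeration suffix starting at i, with
-- skip_next = (r odd), matches B's filter over the suffix zipped with its runs,
-- where r is the length of the flag run ending just before position i
-- (characterised by the invariant: r > 0 ↔ i > 0 and args[i-1] is a flag).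
lemma pvLoop_corr (args : List String) :
    ∀ (rest : List String) (i r : Nat) (acc : List String),
      args.drop i = rest →
      ((0 < i ∧ pvIsFlag (args.getD (i - 1) "") = true) ↔ 0 < r) →
      pvALoop args (PySem.List.enumerate rest (i : Int)) acc (decide (r % 2 = 1))
        = acc ++ (rest.zip (pvRuns rest r)).filterMap pvKeep := by
  intro rest
  induction rest with
  | nil => intro i r acc _ _; simp [PySem.List.enumerate_nil, pvALoop, pvRuns]
  | cons a rest ih =>
    intro i r acc hdrop hinv
    have hi : i < args.length := by
      by_contra h
      rw [List.drop_eq_nil_of_le (by omega)] at hdrop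
      exact absurd hdrop (by simp)
    have ha : args[i] = a := by
      have := List.drop_eq_getElem_cons hi
      rw [hdrop] at this
      exact (List.cons.injEq .. ▸ this).1.symm
    have hgetD : args.getD i "" = a := by rw [List.getD_eq_getElem args "" hi, ha]
    have hdrop' : args.drop (i + 1) = rest := by
      have := List.drop_eq_getElem_cons hi
      rw [hdrop] at this
      exact ((List.cons.injEq .. ▸ this).2).symm
    -- the new run value after consuming a
    set r' := if pvIsFlag a then r + 1 else 0 with hr'
    have hinv' : ((0 < i + 1 ∧ pvIsFlag (args.getD (i + 1 - 1) "") = true) ↔ 0 < r') := by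
      simp only [Nat.add_sub_cancel, hgetD, hr']
      by_cases hf : pvIsFlag a <;> simp [hf]
    have hst : ((i : Int) + 1) = ((i + 1 : Nat) : Int) := by push_cast; ring
    rw [PySem.List.enumerate_cons, pvRuns]
    simp only [List.zip_cons_cons, List.filterMap_cons]
    by_cases hodd : r % 2 = 1
    · -- skip_next is set: A discards this element; B's keep-test fails on parity
      have hkeep : pvKeep (a, r) = none := by
        simp [pvKeep, Nat.mod_two_ne_zero.mpr hodd]
      have hIH := ih (i + 1) r' acc hdrop' hinv'
      rw [show decide (r' % 2 = 1) = false by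
            by_cases hf : pvIsFlag a <;> simp [hr', hf] <;> omega] at hIH
      rw [pvALoop]
      simp only [decide_eq_true_eq, if_pos hodd, hkeep]
      rw [hst]
      exact hIH
    · have heven : r % 2 = 0 := by omega
      rw [pvALoop]
      simp only [decide_eq_true_eq, if_neg hodd]
      by_cases hf : a = "-cp" ∨ a = "-classpath"
      · -- a flag: A sets skip_next; B drops it and starts/extends the run
        have hfb : pvIsFlag a = true := by
          rcases hf with h | h <;> simp [pvIsFlag, h]
        have hkeep : pvKeep (a, r) = none := by
          simp only [pvKeep, hfb]; simp
        have hIH := ih (i + 1) r' acc hdrop' hinv'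
        rw [show decide (r' % 2 = 1) = true by simp [hr', hfb]; omega] at hIH
        rw [if_pos hf, hkeep, hst]
        exact hIH
      · have hfb : pvIsFlag a = false := by
          simp only [pvIsFlag]
          rcases not_or.mp hf with ⟨h1, h2⟩
          simp [h1, h2]
        have hIH0 : ∀ acc', pvALoop args (PySem.List.enumerate rest ((i : Int) + 1)) acc' false
            = acc' ++ (rest.zip (pvRuns rest r')).filterMap pvKeep := by
          intro acc'
          have hIH := ih (i + 1) r' acc' hdrop' hinv'
          rw [show decide (r' % 2 = 1) = false by simp [hr', hfb]] at hIH
          rw [hst]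
          exact hIH
        rw [if_neg hf]
        by_cases h2 : PySem.Str.startswith a "-Djava.library.path=" = true
        · have hkeep : pvKeep (a, r) = none := by
            simp only [pvKeep, h2]; simp
          rw [if_pos h2, hkeep]
          exact hIH0 acc
        · rw [if_neg h2]
          by_cases h3 : PySem.Str.startswith a "-XX:HeapDumpPath=" = true
          · have hkeep : pvKeep (a, r) = none := by
              simp only [pvKeep, h3]; simp
            rw [if_pos h3, hkeep]
            exact hIH0 acc
          · rw [if_neg h3]
            -- A's look-back condition equals B's run-based condition via the invariant
            have hcond : (a = "${classpath}" ∧ (i : Int) > 0 ∧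
                  (PySem.List.pyGetD args ((i : Int) - 1) "" = "-cp" ∨
                   PySem.List.pyGetD args ((i : Int) - 1) "" = "-classpath")) ↔
                (a = "${classpath}" ∧ 0 < r) := by
              constructor
              · rintro ⟨hc, hpos, hprev⟩
                have hip : 0 < i := by exact_mod_cast hpos
                have hcast : ((i : Int) - 1) = ((i - 1 : Nat) : Int) := by omega
                rw [hcast, PySem.List.pyGetD_natCast] at hprev
                have : pvIsFlag (args.getD (i - 1) "") = true := by
                  unfold pvIsFlag
                  rcases hprev with h | h <;> rw [h] <;> rfl
                exact ⟨hc, hinv.mp ⟨hip, this⟩⟩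
              · rintro ⟨hc, hr0⟩
                obtain ⟨hip, hfl⟩ := hinv.mpr hr0
                have hcast : ((i : Int) - 1) = ((i - 1 : Nat) : Int) := by omega
                refine ⟨hc, by exact_mod_cast hip, ?_⟩
                rw [hcast, PySem.List.pyGetD_natCast]
                simp only [pvIsFlag, Bool.or_eq_true, beq_iff_eq] at hfl
                rw [List.getD_eq_getElem?_getD] at hfl
                exact hfl
            by_cases h4 : a = "${classpath}" ∧ 0 < r
            · have hkeep : pvKeep (a, r) = none := by
                have e5 : (a == "${classpath}" && decide (0 < r)) = true := by
                  simp [h4.1, h4.2]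
                simp only [pvKeep, e5]; simp
              rw [if_pos (hcond.mpr h4), hkeep]
              exact hIH0 acc
            · have hkeep : pvKeep (a, r) = some a := by
                have e1 : (r % 2 == 0) = true := by simp [heven]
                have e2 : PySem.Str.startswith a "-Djava.library.path=" = false := by
                  cases hx : PySem.Str.startswith a "-Djava.library.path=" <;> simp_all
                have e3 : PySem.Str.startswith a "-XX:HeapDumpPath=" = false := by
                  cases hx : PySem.Str.startswith a "-XX:HeapDumpPath=" <;> simp_all
                have e5 : (a == "${classpath}" && decide (0 < r)) = false := by
                  by_cases hc : a = "${classpath}"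
                  · have : ¬ 0 < r := fun h => h4 ⟨hc, h⟩
                    simp [hc, this]
                  · simp [hc]
                simp only [pvKeep, e1, hfb, e2, e3, e5]; simp
              rw [if_neg (fun hx => h4 (hcond.mp hx)), hkeep]
              rw [hIH0 (acc ++ [a])]
              simp [hr']

-- ===== VERDICT (by name: the statement is the Claim_ definition above) =====
theorem filter_embedded_launch_args_spec : Claim_equal_filter_embedded_launch_args := by
  intro args _
  unfold Spec_filter_embedded_launch_args filter_embedded_launch_args filter_embedded_launch_args_alt
  have h := pvLoop_corr args args 0 0 [] (by simp) (by simp)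
  simpa using h
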